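-- pv_equiv track=rewrite | github.com/KaneRodriguez/google-interview-prep | leetcode/890.py | getPCode
-- ===== SOURCE A (Python) =====
-- def getPCode(word):
--     pCode = ""
--     count = 0
--     codeMap = {}
--
--     for char in word:
--         if char in codeMap:
--             pCode += codeMap[char]
--         else:
--             pCode += str(count)
--             codeMap[char] = str(count)
--             count += 1
--
--     return pCode
-- ===== SOURCE B (Python) =====
-- def getPCode(word):
--     # code of each character = number of distinct characters appearing
--     # strictly before its first occurrence in the word
--     return ''.join(str(len(set(word[:word.index(c)]))) for c in word)
-- ===== Notes on version B (the rewrite author's own statement) =====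
-- stated objective: alternative
-- what changed: A builds the code in one stateful pass with a dict and a running counter; B keeps no state at all and computes each character's code independently as len(set(word[:word.index(c)])) - the number of distinct characters before its first occurrence - joining the digit strings.
import Mathlib
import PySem

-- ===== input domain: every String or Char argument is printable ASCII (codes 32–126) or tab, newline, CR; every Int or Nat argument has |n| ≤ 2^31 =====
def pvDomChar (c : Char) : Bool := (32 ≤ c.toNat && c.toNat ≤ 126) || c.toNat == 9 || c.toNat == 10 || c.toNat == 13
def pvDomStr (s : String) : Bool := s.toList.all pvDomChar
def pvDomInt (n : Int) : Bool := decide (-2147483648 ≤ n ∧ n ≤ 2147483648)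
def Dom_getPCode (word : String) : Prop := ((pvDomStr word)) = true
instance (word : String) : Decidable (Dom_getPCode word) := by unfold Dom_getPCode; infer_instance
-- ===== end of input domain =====

-- B drops A's dict and running counter entirely: each character's code is computed
-- independently as the number of distinct characters before its first occurrence;
-- alternative decomposition, no speed claim (B is quadratic where A is linear).

-- ===== PORT A =====
-- A's single pass.  State st = (pCode, count, codeMap) as st.1, st.2.1, st.2.2;
-- the code string is kept as List Char (PySem strings are exact on the List Char side).
def getPCode (word : String) : String :=
  String.ofList
    (word.toList.foldl
      (fun (st : List Char × Int × PySem.Dict Char String) c =>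
        if st.2.2.contains c then
          (st.1 ++ (st.2.2.getD c "").toList, st.2.1, st.2.2)          -- pCode += codeMap[char]
        else
          (st.1 ++ (PySem.Int.toStr st.2.1).toList, st.2.1 + 1,        -- pCode += str(count); count += 1
           st.2.2.insert c (PySem.Int.toStr st.2.1)))                  -- codeMap[char] = str(count)
      ([], 0, PySem.Dict.empty)).1

-- ===== PORT B =====
-- ''.join(str(len(set(word[:word.index(c)]))) for c in word)
-- word.index(c) always hits (c is drawn from word), so the Option is read with getD;
-- word[:i] with 0 ≤ i is PySem.List.slice … none (some i); set(…) is PySem.Set.ofList; len is Set.len.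
def getPCode_alt (word : String) : String :=
  String.ofList
    ((word.toList.map (fun c =>
       (PySem.Int.toStr
         (PySem.Set.len (PySem.Set.ofList
           (PySem.List.slice word.toList none
             (some (((PySem.List.index? word.toList c).getD 0 : Nat) : Int)))))).toList)).flatten)

-- ===== PRECONDITION & SPEC =====
def Spec_getPCode (word : String) (out : String) : Prop := out = getPCode_alt word
instance (word : String) (out : String) : Decidable (Spec_getPCode word out) := by unfold Spec_getPCode; infer_instance

-- ===== CLAIM (what is proved, stated in full; the proofs are below) =====
def Claim_equal_getPCode : Prop := ∀ (word : String), Dom_getPCode word → Spec_getPCode word (getPCode word)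

-- ===== LEMMAS AND PROOFS =====

-- ---- A side: the index dict A effectively holds: char ↦ str(its first-seen position) ----
def pvDictOf (S : List Char) : PySem.Dict Char String :=
  (PySem.List.enumerate S 0).foldl (fun d p => d.insert p.2 (PySem.Int.toStr p.1)) PySem.Dict.empty

theorem pvDictOf_append_singleton (S : List Char) (c : Char) :
    pvDictOf (S ++ [c]) = (pvDictOf S).insert c (PySem.Int.toStr (S.length : Int)) := by
  simp [pvDictOf, PySem.List.enumerate_append, PySem.List.enumerate_cons]

theorem pvDictOf_getD (S : List Char) (h : S.Nodup) (c : Char) :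
    (pvDictOf S).getD c "" =
      if c ∈ S then PySem.Int.toStr ((S.idxOf c : Nat) : Int) else "" := by
  induction S using List.reverseRecOn with
  | nil => simp [pvDictOf]
  | append_singleton S a ih =>
    obtain ⟨hnd, -, hdisj⟩ := List.nodup_append.1 h
    have ha : a ∉ S := fun hm => hdisj a hm a (by simp) rfl
    rw [pvDictOf_append_singleton, PySem.Dict.getD_insert]
    by_cases hc : c = a
    · subst hc
      rw [if_pos rfl, if_pos (by simp)]
      rw [List.idxOf_append, List.idxOf_eq_length_iff.2 ha]
      simp [ha]
    · rw [if_neg hc, ih hnd]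
      by_cases hm : c ∈ S
      · simp [hm, hc, List.idxOf_append_of_mem hm]
      · simp [hm, hc]

theorem pvDictOf_contains (S : List Char) (c : Char) :
    (pvDictOf S).contains c = decide (c ∈ S) := by
  rw [pvDictOf, PySem.Dict.contains_eq_decide_mem_keys,
      PySem.Dict.keys_foldl_insert_key (key := fun p : Int × Char => p.2)]
  simp [PySem.List.map_snd_enumerate]

theorem pvExtend_prefix (S : List Char) (rest : List Char) :
    ∃ t, PySem.Set.update S rest = S ++ t :=
  ⟨_, PySem.Set.update_eq_append_filter S rest⟩

-- the main invariant of A's loop, against the first-seen list S of the processed prefix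
theorem pvLoopA (rest : List Char) : ∀ (S : List Char) (acc : List Char), S.Nodup →
    (rest.foldl
      (fun (st : List Char × Int × PySem.Dict Char String) c =>
        if st.2.2.contains c then
          (st.1 ++ (st.2.2.getD c "").toList, st.2.1, st.2.2)
        else
          (st.1 ++ (PySem.Int.toStr st.2.1).toList, st.2.1 + 1,
           st.2.2.insert c (PySem.Int.toStr st.2.1)))
      (acc, (S.length : Int), pvDictOf S)).1 =
      acc ++ (rest.map (fun c =>
        (PySem.Int.toStr (((PySem.Set.update S rest).idxOf c : Nat) : Int)).toList)).flatten := by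
  induction rest with
  | nil => intro S acc _; simp [PySem.Set.update]
  | cons c rest ih =>
    intro S acc hnd
    simp only [List.foldl_cons, List.map_cons, List.flatten_cons]
    rw [pvDictOf_contains]
    by_cases hc : c ∈ S
    · have hupd : PySem.Set.update S (c :: rest) = PySem.Set.update S rest := by
        simp [PySem.Set.update, PySem.Set.add, hc]
      rw [hupd]
      have hidx : (PySem.Set.update S rest).idxOf c = S.idxOf c := by
        obtain ⟨t, ht⟩ := pvExtend_prefix S rest
        rw [ht]; exact List.idxOf_append_of_mem hc
      simp only [hc, decide_true, if_true, pvDictOf_getD S hnd c]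
      rw [ih S _ hnd, hidx, List.append_assoc]
    · have hupd : PySem.Set.update S (c :: rest) = PySem.Set.update (S ++ [c]) rest := by
        simp [PySem.Set.update, PySem.Set.add, hc]
      rw [hupd]
      have hnd' : (S ++ [c]).Nodup := by
        simp [List.nodup_append, hnd]
        exact fun a ha har => hc (har ▸ ha)
      have hidx : (PySem.Set.update (S ++ [c]) rest).idxOf c = S.length := by
        obtain ⟨t, ht⟩ := pvExtend_prefix (S ++ [c]) rest
        rw [ht, List.idxOf_append_of_mem (by simp)]
        rw [List.idxOf_append, List.idxOf_eq_length_iff.2 hc]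
        simp [hc]
      simp only [hc, decide_false, Bool.false_eq_true, if_false]
      rw [show (pvDictOf S).insert c (PySem.Int.toStr (S.length : Int)) = pvDictOf (S ++ [c])
            from (pvDictOf_append_singleton S c).symm,
          show ((S.length : Int) + 1) = (((S ++ [c]).length : Nat) : Int) by simp]
      rw [ih (S ++ [c]) _ hnd', hidx, List.append_assoc]

-- A computes the translation of word through the first-seen list dedup word
theorem pvA_eq (word : String) :
    getPCode word = String.ofList ((word.toList.map (fun c =>
      (PySem.Int.toStr (((PySem.List.dedup word.toList).idxOf c : Nat) : Int)).toList)).flatten) := by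
  unfold getPCode
  have h := pvLoopA word.toList [] [] List.nodup_nil
  simp only [List.length_nil, Nat.cast_zero] at h
  rw [show pvDictOf [] = PySem.Dict.empty from rfl] at h
  rw [h]
  simp only [List.nil_append, PySem.List.dedup_eq_ofList, PySem.Set.ofList_eq_foldl,
    PySem.Set.update]

-- ---- B side: counting the distinct characters of the prefix before the first
-- occurrence of c gives c's position in the first-seen list ----
theorem pvRank (l : List Char) : ∀ (S : List Char) (c : Char), c ∈ l → c ∉ S →
    (PySem.Set.update S (l.take (l.idxOf c))).length = (PySem.Set.update S l).idxOf c := by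
  induction l with
  | nil => intro S c hc; exact absurd hc (List.not_mem_nil)
  | cons a t ih =>
    intro S c hc hS
    by_cases hca : c = a
    · subst hca
      rw [List.idxOf_cons_self, List.take_zero]
      have hadd : PySem.Set.add S c = S ++ [c] := by
        simp [PySem.Set.add, PySem.Set.contains_eq_listContains]
        intro h; exact absurd h hS
      have : PySem.Set.update S (c :: t) = PySem.Set.update (S ++ [c]) t := by
        simp [PySem.Set.update, hadd]
      rw [this]
      obtain ⟨r, hr⟩ := pvExtend_prefix (S ++ [c]) t
      rw [hr, List.idxOf_append_of_mem (by simp)]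
      rw [List.idxOf_append, List.idxOf_eq_length_iff.2 hS]
      simp [hS, PySem.Set.update]
    · have hct : c ∈ t := by cases hc with
        | head => exact absurd rfl hca
        | tail _ h => exact h
      rw [List.idxOf_cons_ne _ (fun h => hca h.symm), List.take_succ_cons]
      rw [show PySem.Set.update S (a :: t.take (t.idxOf c))
            = PySem.Set.update (PySem.Set.add S a) (t.take (t.idxOf c)) from rfl,
          show PySem.Set.update S (a :: t) = PySem.Set.update (PySem.Set.add S a) t from rfl]
      exact ih (PySem.Set.add S a) c hct (by
        rw [PySem.Set.mem_add]
        rintro (h | h)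
        · exact hS h
        · exact hca h)

-- B equals the same canonical form
theorem pvB_eq (word : String) :
    getPCode_alt word = String.ofList ((word.toList.map (fun c =>
      (PySem.Int.toStr (((PySem.List.dedup word.toList).idxOf c : Nat) : Int)).toList)).flatten) := by
  unfold getPCode_alt
  congr 1
  congr 1
  apply List.map_congr_left
  intro c hc
  obtain ⟨k, hk⟩ := Option.isSome_iff_exists.mp ((PySem.List.index?_isSome_iff word.toList c).2 hc)
  have hidx : word.toList.idxOf c = k := by
    have hk' := hk
    rw [PySem.List.index?_eq_idxOf?] at hk'
    rw [List.idxOf_eq_getD_idxOf?, hk']; rfl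
  rw [hk, Option.getD_some, PySem.List.slice_to_natCast, ← hidx]
  have h := pvRank word.toList [] c hc (List.not_mem_nil)
  simp only [PySem.Set.update] at h
  rw [show PySem.Set.len (PySem.Set.ofList (word.toList.take (word.toList.idxOf c)))
        = ((PySem.Set.ofList (word.toList.take (word.toList.idxOf c))).length : Int) from rfl]
  rw [show PySem.Set.ofList (word.toList.take (word.toList.idxOf c))
        = (word.toList.take (word.toList.idxOf c)).foldl PySem.Set.add []
      from PySem.Set.ofList_eq_foldl _]
  rw [h, PySem.List.dedup_eq_ofList, PySem.Set.ofList_eq_foldl]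

-- ===== VERDICT (by name: the statement is the Claim_ definition above) =====
theorem getPCode_spec : Claim_equal_getPCode := by
  intro word _
  unfold Spec_getPCode
  rw [pvA_eq, pvB_eq]
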